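-- pv_equiv track=rewrite | github.com/krisuety/Mango_plate_NLP | crawling/siksin/식신_requests/[review2]_Request.py | Paging
-- ===== SOURCE A (Python) =====
-- def Paging(num):
--     result = []
--     start = 1
--     while num > 100:
--         limit = 100
--         result.append([start,limit])
--         num -= 100
--         start = start + limit
--     result.append([start, num-1])
--     return result
-- ===== SOURCE B (Python) =====
-- def Paging(num):
--     # back-to-front: compute the last page first, walk starts downward, then reverse
--     start = 1 + 100 * max(0, (num - 1) // 100)
--     out = [[start, num - start]]
--     while start > 1:
--         start -= 100
--         out.append([start, 100])
--     out.reverse()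
--     return out
-- ===== Notes on version B (the rewrite author's own statement) =====
-- stated objective: alternative
-- what changed: B builds the page list back-to-front: it jumps straight to the last page via a floor division, emits it first, walks the start positions downward by 100 (never touching num in the loop), and reverses at the end, instead of A's forward loop that decrements num and carries a running start.
import Mathlib
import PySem

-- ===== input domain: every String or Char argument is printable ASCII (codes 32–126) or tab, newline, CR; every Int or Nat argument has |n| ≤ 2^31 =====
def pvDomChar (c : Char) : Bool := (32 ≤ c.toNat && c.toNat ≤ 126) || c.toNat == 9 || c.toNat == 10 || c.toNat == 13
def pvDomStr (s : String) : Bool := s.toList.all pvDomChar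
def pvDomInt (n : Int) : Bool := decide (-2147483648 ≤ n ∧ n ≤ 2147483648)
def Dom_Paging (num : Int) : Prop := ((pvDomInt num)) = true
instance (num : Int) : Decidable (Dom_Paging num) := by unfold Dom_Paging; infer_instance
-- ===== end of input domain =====

-- B builds the page list back-to-front: last page first via a floor division, start positions
-- walked downward, then reversed (objective: alternative decomposition, same cost).

-- ===== PORT A =====
-- A's while loop: state (num, start, result); appends [start,100] while num > 100.
def PagingLoop (num start : Int) (acc : List (List Int)) : List (List Int) :=
  if num > 100 then
    PagingLoop (num - 100) (start + 100) (acc ++ [[start, 100]])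
  else
    acc ++ [[start, num - 1]]
termination_by num.toNat
decreasing_by omega

def Paging (num : Int) : List (List Int) := PagingLoop num 1 []

-- ===== PORT B =====
-- B's while loop: state (start, out); 'start -= 100; out.append([start,100])' while start > 1,
-- then 'out.reverse()'.
def PagingAltLoop (start : Int) (out : List (List Int)) : List (List Int) :=
  if start > 1 then
    PagingAltLoop (start - 100) (out ++ [[start - 100, 100]])
  else
    out.reverse
termination_by start.toNat
decreasing_by omega

def Paging_alt (num : Int) : List (List Int) :=
  let start : Int := 1 + 100 * max 0 (PySem.Int.floordiv (num - 1) 100)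
  PagingAltLoop start [[start, num - start]]

-- ===== PRECONDITION & SPEC =====
def Spec_Paging (num : Int) (out : List (List Int)) : Prop := out = Paging_alt num
instance (num : Int) (out : List (List Int)) : Decidable (Spec_Paging num out) := by unfold Spec_Paging; infer_instance

-- ===== CLAIM (what is proved, stated in full; the proofs are below) =====
def Claim_equal_Paging : Prop := ∀ (num : Int), Dom_Paging num → Spec_Paging num (Paging num)

-- ===== LEMMAS AND PROOFS =====

-- common closed form: full pages at starts 1, 101, …, then the leftover page
def pages (num : Int) : List (List Int) :=
  let count : Nat := (max 0 (PySem.Int.floordiv (num - 1) 100)).toNat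
  ((List.range count).map (fun (i : Nat) => [1 + 100 * (i : Int), 100]))
    ++ [[1 + 100 * (count : Int), num - 100 * (count : Int) - 1]]

-- A-side: start-generalised closed form
def pagesFrom (num start : Int) : List (List Int) :=
  let count : Nat := (max 0 (PySem.Int.floordiv (num - 1) 100)).toNat
  ((List.range count).map (fun (i : Nat) => [start + 100 * (i : Int), 100]))
    ++ [[start + 100 * (count : Int), num - 100 * (count : Int) - 1]]

theorem count_succ (num : Int) (h : num > 100) :
    (max 0 (PySem.Int.floordiv (num - 1) 100)).toNat
      = (max 0 (PySem.Int.floordiv (num - 100 - 1) 100)).toNat + 1 := by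
  have h1 : PySem.Int.floordiv (num - 1) 100 = PySem.Int.floordiv (num - 100 - 1) 100 + 1 := by
    have := PySem.Int.floordiv_mul_add_mod (num - 100 - 1) 100
    have hm := PySem.Int.mod_nonneg (a := num - 100 - 1) (b := 100) (by norm_num)
    have hm2 := PySem.Int.mod_lt (a := num - 100 - 1) (b := 100) (by norm_num)
    rw [PySem.Int.floordiv_eq_iff_of_pos (by norm_num)]
    constructor <;> nlinarith
  have h2 : PySem.Int.floordiv (num - 1) 100 ≥ 1 := by
    rw [ge_iff_le, PySem.Int.le_floordiv_iff_mul_le (by norm_num)]; omega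
  omega

theorem map_range_shift (c : Nat) (start : Int) :
    (List.range (c + 1)).map (fun (i : Nat) => [start + 100 * (i : Int), 100])
      = [start, 100] :: (List.range c).map (fun (i : Nat) => [(start + 100) + 100 * (i : Int), 100]) := by
  rw [List.range_succ_eq_map, List.map_cons, List.map_map]
  congr 1
  · norm_num
  · apply List.map_congr_left
    intro i _
    simp only [Function.comp_apply]
    push_cast
    ring_nf

theorem pagesFrom_step (num start : Int) (h : num > 100) :
    pagesFrom num start = [start, 100] :: pagesFrom (num - 100) (start + 100) := by
  have hc := count_succ num h
  simp only [pagesFrom, hc, map_range_shift, List.cons_append]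
  push_cast
  ring_nf

theorem pagesFrom_base (num start : Int) (h : ¬ num > 100) :
    pagesFrom num start = [[start, num - 1]] := by
  have hc : (max 0 (PySem.Int.floordiv (num - 1) 100)).toNat = 0 := by
    have : PySem.Int.floordiv (num - 1) 100 < 1 := by
      rw [PySem.Int.floordiv_lt_iff_lt_mul (by norm_num)]; omega
    omega
  simp only [pagesFrom, hc]
  norm_num

theorem pagingLoop_eq (num start : Int) (acc : List (List Int)) :
    PagingLoop num start acc = acc ++ pagesFrom num start := by
  induction num, start, acc using PagingLoop.induct with
  | case1 num start acc h ih =>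
    rw [PagingLoop, if_pos h, ih, pagesFrom_step num start h]
    simp
  | case2 num start acc h =>
    rw [PagingLoop, if_neg h, pagesFrom_base num start h]

-- B-side: the downward loop from start = 1 + 100*c produces the ascending full pages
theorem altLoop_closed (c : Nat) (acc : List (List Int)) :
    PagingAltLoop (1 + 100 * (c : Int)) acc
      = ((List.range c).map (fun (i : Nat) => [1 + 100 * (i : Int), 100])) ++ acc.reverse := by
  induction c generalizing acc with
  | zero =>
    rw [PagingAltLoop, if_neg (by norm_num)]
    simp
  | succ c ih =>
    rw [PagingAltLoop, if_pos (by push_cast; omega)]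
    have harg : (1 + 100 * ((c : Int) + 1)) - 100 = 1 + 100 * (c : Int) := by ring
    push_cast
    rw [harg, ih]
    simp [List.range_succ]

theorem alt_eq_pages (num : Int) : Paging_alt num = pages num := by
  have hnn : (0 : Int) ≤ max 0 (PySem.Int.floordiv (num - 1) 100) := le_max_left _ _
  have hcast : ((max 0 (PySem.Int.floordiv (num - 1) 100)).toNat : Int)
      = max 0 (PySem.Int.floordiv (num - 1) 100) := Int.toNat_of_nonneg hnn
  obtain ⟨c, hc⟩ : ∃ c : Nat, (c : Int) = max 0 (PySem.Int.floordiv (num - 1) 100) :=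
    ⟨_, hcast⟩
  unfold Paging_alt pages
  rw [← hc, Int.toNat_natCast, altLoop_closed]
  simp only [List.reverse_cons, List.reverse_nil, List.nil_append]
  congr 2
  ring

-- ===== VERDICT (by name: the statement is the Claim_ definition above) =====
theorem Paging_spec : Claim_equal_Paging := by
  intro num _
  show Paging num = Paging_alt num
  rw [Paging, pagingLoop_eq, alt_eq_pages]
  simp [pagesFrom, pages]
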